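-- pv_equiv track=rewrite | github.com/JamesMCo/Advent-Of-Code | 2022/25/Part1.py | solve
-- ===== SOURCE A (Python) =====
-- from itertools import zip_longest
--
-- def solve(puzzle_input):
--     class SNAFU:
--         @classmethod
--         def from_list(cls, digits):
--             n = SNAFU("0")
--             n.val = digits
--             return n
--
--         def __init__(self, val):
--             self.val = ["=-012".index(n) - 2 for n in val[::-1]]
--
--         def __str__(self):
--             return "".join("=-012"[n + 2] for n in self.val[::-1])
--
--         def __add__(self, other):
--             digits = []
--             carry = 0
--             for a, b in zip_longest(self.val, other.val, fillvalue=0):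
--                 n = a + b + carry
--                 if n >= 3:
--                     n -= 5
--                     carry = 1
--                 elif n <= -3:
--                     n += 5
--                     carry = -1
--                 else:
--                     carry = 0
--                 digits.append(n)
--             digits.append(carry)
--
--             while len(digits) > 1 and digits[-1] == 0:
--                 digits.pop()
--
--             return SNAFU.from_list(digits)
--
--     return str(sum((SNAFU(n) for n in puzzle_input[1:]), start=SNAFU(puzzle_input[0])))
-- ===== SOURCE B (Python) =====
-- def solve(puzzle_input):
--     total = 0
--     for line in puzzle_input:
--         n = 0
--         for c in line:
--             n = n * 5 + ("=-012".index(c) - 2)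
--         total += n
--     if total == 0:
--         return "0"
--     res = ""
--     while total != 0:
--         r = total % 5
--         if r > 2:
--             res = "=-012"[r - 5 + 2] + res
--             total = total // 5 + 1
--         else:
--             res = "=-012"[r + 2] + res
--             total = total // 5
--     return res
-- ===== Notes on version B (the rewrite author's own statement) =====
-- stated objective: simpler
-- what changed: B replaces A's digit-list class with balanced base-5 carry addition and end-trimming by plain integer arithmetic: parse each SNAFU string to an int, sum the ints, and convert the total back with a single modulus/carry loop.
-- intended difference: On a single-element input whose string is empty or has a leading zero (e.g. ['01']), A echoes the string verbatim ('01', or '' for ['']) because no addition ever normalises it, while B returns the canonical SNAFU numeral ('1', resp. '0'), which is the intended representation of the sum. — e.g. on solve(["01"]): A returns "01", B returns "1"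
import Mathlib
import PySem

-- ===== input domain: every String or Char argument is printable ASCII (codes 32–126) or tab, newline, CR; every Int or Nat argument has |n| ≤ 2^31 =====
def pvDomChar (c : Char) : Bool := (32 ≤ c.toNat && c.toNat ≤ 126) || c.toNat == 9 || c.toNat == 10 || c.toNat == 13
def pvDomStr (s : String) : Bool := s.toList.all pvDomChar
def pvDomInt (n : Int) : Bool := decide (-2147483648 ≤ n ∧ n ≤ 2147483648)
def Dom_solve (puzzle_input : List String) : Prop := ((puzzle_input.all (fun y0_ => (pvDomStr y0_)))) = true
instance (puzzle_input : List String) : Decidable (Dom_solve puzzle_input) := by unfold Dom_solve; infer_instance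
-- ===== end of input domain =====

-- B replaces A's digit-list SNAFU class by plain integer arithmetic (parse to int, sum, one
-- modulus/carry loop back); the proof covers return values only (A mutates nothing observable).

-- ===== PORT A =====

-- "=-012".index(n) - 2; on a char outside "=-012" Python raises ValueError (excluded by Pre_)
def pvDig (c : Char) : Int := ("=-012".toList.idxOf c : Int) - 2

-- "=-012"[n + 2]; in range (possibly after Python's negative-index wrap) for the digits that occur
def pvChr (d : Int) : Char := (PySem.List.pyGet? "=-012".toList (d + 2)).getD '!'

-- ["=-012".index(n) - 2 for n in val[::-1]]
def pvParse (s : String) : List Int := s.toList.reverse.map pvDig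

-- body of the zip_longest loop: returns (appended digit, new carry)
def pvStep (a b c : Int) : Int × Int :=
  if a + b + c ≥ 3 then (a + b + c - 5, 1)
  else if a + b + c ≤ -3 then (a + b + c + 5, -1)
  else (a + b + c, 0)

-- the zip_longest(fillvalue=0) loop, with the final `digits.append(carry)`
def pvAddLoop : List Int → List Int → Int → List Int
  | [], [], c => [c]
  | [], b :: bs, c => (pvStep 0 b c).1 :: pvAddLoop [] bs (pvStep 0 b c).2
  | a :: as, [], c => (pvStep a 0 c).1 :: pvAddLoop as [] (pvStep a 0 c).2
  | a :: as, b :: bs, c => (pvStep a b c).1 :: pvAddLoop as bs (pvStep a b c).2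

-- `while len(digits) > 1 and digits[-1] == 0: digits.pop()`, phrased on the reversed list
def pvStripR : List Int → List Int
  | [] => []
  | [d] => [d]
  | d :: ds => if d = 0 then pvStripR ds else d :: ds

def pvStripEnd (l : List Int) : List Int := (pvStripR l.reverse).reverse

-- SNAFU.__add__
def pvAdd (as bs : List Int) : List Int := pvStripEnd (pvAddLoop as bs 0)

-- SNAFU.__str__: "".join("=-012"[n + 2] for n in self.val[::-1])
def pvToStr (l : List Int) : String := String.ofList (l.reverse.map pvChr)

-- str(sum((SNAFU(n) for n in puzzle_input[1:]), start=SNAFU(puzzle_input[0])))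
-- puzzle_input[0] raises IndexError on []; excluded by Pre_
def solve (puzzle_input : List String) : String :=
  match puzzle_input with
  | [] => ""
  | h :: t => pvToStr (t.foldl (fun acc s => pvAdd acc (pvParse s)) (pvParse h))

-- ===== PORT B =====

-- n = n * 5 + ("=-012".index(c) - 2) over the characters of one line
def pvToInt (s : String) : Int := s.toList.foldl (fun n c => n * 5 + pvDig c) 0

-- the two termination facts for the while loop (cited by decreasing_by)
theorem pvLoop_dec_hi (n : Int) (_h : ¬ n = 0) (hr : PySem.Int.mod n 5 > 2) :
    (PySem.Int.floordiv n 5 + 1).natAbs < n.natAbs := by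
  rw [PySem.Int.floordiv_eq_ediv_of_pos (by norm_num)]
  rw [PySem.Int.mod_eq_emod_of_pos (by norm_num)] at hr
  omega

theorem pvLoop_dec_lo (n : Int) (h : ¬ n = 0) (hr : ¬ PySem.Int.mod n 5 > 2) :
    (PySem.Int.floordiv n 5).natAbs < n.natAbs := by
  rw [PySem.Int.floordiv_eq_ediv_of_pos (by norm_num)]
  rw [PySem.Int.mod_eq_emod_of_pos (by norm_num)] at hr
  omega

-- the while loop: res is the list of characters already produced (prepended)
def pvLoop (n : Int) (res : List Char) : List Char :=
  if h : n = 0 then res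
  else
    if hr : PySem.Int.mod n 5 > 2 then
      pvLoop (PySem.Int.floordiv n 5 + 1) (pvChr (PySem.Int.mod n 5 - 5) :: res)
    else
      pvLoop (PySem.Int.floordiv n 5) (pvChr (PySem.Int.mod n 5) :: res)
  termination_by n.natAbs
  decreasing_by
  · exact pvLoop_dec_hi n h hr
  · exact pvLoop_dec_lo n h hr

def solve_alt (puzzle_input : List String) : String :=
  let total := puzzle_input.foldl (fun t s => t + pvToInt s) 0
  if total = 0 then "0" else String.ofList (pvLoop total [])

-- ===== PRECONDITION & SPEC =====

-- Pre_ excludes the empty list (puzzle_input[0] raises IndexError) and any character outside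
-- "=-012" ("=-012".index(n) raises ValueError); A raises on exactly those inputs.
def Pre_solve (puzzle_input : List String) : Prop :=
  puzzle_input ≠ [] ∧
    ∀ s ∈ puzzle_input, (s.toList.all (fun c => c ∈ ['=', '-', '0', '1', '2'])) = true

instance (puzzle_input : List String) : Decidable (Pre_solve puzzle_input) := by
  unfold Pre_solve; infer_instance

def pvWitness_solve : List String := ["1=", "12"]

-- On a single-element input whose string is empty or has a leading zero, A echoes the string
-- verbatim (no addition ever normalises it), while B returns the canonical SNAFU numeral of its
-- value, which is the intended representation of the sum.
def D_solve (puzzle_input : List String) : Prop :=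
  puzzle_input.length = 1 ∧
    ∀ s ∈ puzzle_input, s.toList = [] ∨ (2 ≤ s.toList.length ∧ s.toList.head? = some '0')

instance (puzzle_input : List String) : Decidable (D_solve puzzle_input) := by
  unfold D_solve; infer_instance

def Spec_solve (puzzle_input : List String) (out : String) : Prop :=
  ¬ D_solve puzzle_input → out = solve_alt puzzle_input

instance (puzzle_input : List String) (out : String) : Decidable (Spec_solve puzzle_input out) := by
  unfold Spec_solve; infer_instance

def pvDiffWitness_solve : List String := ["01"]
def pvDiffWitnessOut_solve : String × String := ("01", "1")

-- ===== CLAIM (what is proved, stated in full; the proofs are below) =====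
def Claim_unchanged_solve : Prop :=
  ∀ (puzzle_input : List String), Dom_solve puzzle_input → Pre_solve puzzle_input →
    Spec_solve puzzle_input (solve puzzle_input)

def Claim_changed_solve : Prop :=
  Dom_solve (pvDiffWitness_solve) ∧ Pre_solve (pvDiffWitness_solve) ∧ D_solve (pvDiffWitness_solve) ∧
    solve (pvDiffWitness_solve) = pvDiffWitnessOut_solve.1 ∧
    solve_alt (pvDiffWitness_solve) = pvDiffWitnessOut_solve.2 ∧
    pvDiffWitnessOut_solve.1 ≠ pvDiffWitnessOut_solve.2

def Claim_exact_solve : Prop :=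
  ∀ (puzzle_input : List String), Dom_solve puzzle_input → Pre_solve puzzle_input →
    D_solve puzzle_input → solve puzzle_input ≠ solve_alt puzzle_input

-- ===== LEMMAS AND PROOFS =====

-- value of a little-endian balanced base-5 digit list
def pvVal : List Int → Int
  | [] => 0
  | d :: ds => d + 5 * pvVal ds

-- all digits in the balanced range
def pvOK (l : List Int) : Prop := ∀ d ∈ l, -2 ≤ d ∧ d ≤ 2

-- canonical: no high-order zero (except the single digit 0)
def pvCanon (l : List Int) : Prop := l = [0] ∨ (l ≠ [] ∧ l.getLast? ≠ some 0)

theorem pvVal_append (l : List Int) (d : Int) :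
    pvVal (l ++ [d]) = pvVal l + d * 5 ^ l.length := by
  induction l with
  | nil => simp [pvVal]
  | cons a as ih => simp [pvVal, ih, pow_succ]; ring

theorem pvToInt_foldl (cs : List Char) (a : Int) :
    cs.foldl (fun n c => n * 5 + pvDig c) a = pvVal ((cs.map pvDig).reverse) + a * 5 ^ cs.length := by
  induction cs generalizing a with
  | nil => simp [pvVal]
  | cons c cs ih =>
    simp only [List.foldl_cons, ih, List.map_cons, List.reverse_cons, pvVal_append]
    simp [pow_succ]; ring

theorem pvToInt_eq (s : String) : pvToInt s = pvVal (pvParse s) := by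
  simp [pvToInt, pvParse, pvToInt_foldl, List.map_reverse]

theorem pvStep_val (a b c : Int) :
    (pvStep a b c).1 + 5 * (pvStep a b c).2 = a + b + c := by
  unfold pvStep; split_ifs <;> simp

theorem pvStep_ok (a b c : Int) (ha : -2 ≤ a ∧ a ≤ 2) (hb : -2 ≤ b ∧ b ≤ 2)
    (hc : -1 ≤ c ∧ c ≤ 1) :
    (-2 ≤ (pvStep a b c).1 ∧ (pvStep a b c).1 ≤ 2) ∧
      -1 ≤ (pvStep a b c).2 ∧ (pvStep a b c).2 ≤ 1 := by
  unfold pvStep; split_ifs <;> simp <;> omega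

theorem pvAddLoop_val (as bs : List Int) (c : Int) :
    pvVal (pvAddLoop as bs c) = pvVal as + pvVal bs + c := by
  fun_induction pvAddLoop as bs c with
  | case1 c => simp [pvVal]
  | case2 b bs c ih =>
      simp only [pvVal, ih]
      have := pvStep_val 0 b c; omega
  | case3 a as c ih =>
      simp only [pvVal, ih]
      have := pvStep_val a 0 c; omega
  | case4 a as b bs c ih =>
      simp only [pvVal, ih]
      have := pvStep_val a b c; omega

theorem pvAddLoop_ok (as bs : List Int) (c : Int) (has : pvOK as) (hbs : pvOK bs)
    (hc : -1 ≤ c ∧ c ≤ 1) : pvOK (pvAddLoop as bs c) := by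
  fun_induction pvAddLoop as bs c with
  | case1 c =>
      intro d hd; simp at hd; omega
  | case2 b bs c ih =>
      have hb := hbs b (by simp)
      have hs := pvStep_ok 0 b c (by omega) hb hc
      intro d hd
      rcases List.mem_cons.mp hd with h | h
      · subst h; exact hs.1
      · exact ih has (fun x hx => hbs x (by simp [hx])) hs.2 d h
  | case3 a as c ih =>
      have ha := has a (by simp)
      have hs := pvStep_ok a 0 c ha (by omega) hc
      intro d hd
      rcases List.mem_cons.mp hd with h | h
      · subst h; exact hs.1
      · exact ih (fun x hx => has x (by simp [hx])) hbs hs.2 d h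
  | case4 a as b bs c ih =>
      have ha := has a (by simp)
      have hb := hbs b (by simp)
      have hs := pvStep_ok a b c ha hb hc
      intro d hd
      rcases List.mem_cons.mp hd with h | h
      · subst h; exact hs.1
      · exact ih (fun x hx => has x (by simp [hx])) (fun x hx => hbs x (by simp [hx])) hs.2 d h

theorem pvAddLoop_ne_nil (as bs : List Int) (c : Int) : pvAddLoop as bs c ≠ [] := by
  fun_induction pvAddLoop as bs c <;> simp

theorem pvStripR_val (r : List Int) : pvVal ((pvStripR r).reverse) = pvVal r.reverse := by
  fun_induction pvStripR r with
  | case1 => rfl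
  | case2 d => rfl
  | case3 ds hne ih => simp [ih, List.reverse_cons, pvVal_append]
  | case4 d ds hne h => rfl

theorem pvStripR_mem (r : List Int) (d : Int) : d ∈ pvStripR r → d ∈ r := by
  fun_induction pvStripR r with
  | case1 => exact fun h => h
  | case2 _ => exact fun h => h
  | case3 ds hne ih => exact fun h => List.mem_cons_of_mem _ (ih h)
  | case4 a ds hne h0 => exact fun h => h

theorem pvStripR_canon (r : List Int) (h : r ≠ []) : pvCanon ((pvStripR r).reverse) := by
  fun_induction pvStripR r with
  | case1 => exact absurd rfl h
  | case2 d =>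
      by_cases hd : d = 0
      · subst hd; exact Or.inl rfl
      · exact Or.inr ⟨by simp, by simp [hd]⟩
  | case3 ds hne ih => exact ih (fun hc => hne (by simp [hc]))
  | case4 a ds hne h0 =>
      refine Or.inr ⟨by simp, ?_⟩
      simp [List.getLast?_reverse, h0]

theorem pvAdd_spec (as bs : List Int) (has : pvOK as) (hbs : pvOK bs) :
    pvVal (pvAdd as bs) = pvVal as + pvVal bs ∧ pvOK (pvAdd as bs) ∧ pvCanon (pvAdd as bs) := by
  refine ⟨?_, ?_, ?_⟩
  · have := pvStripR_val (pvAddLoop as bs 0).reverse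
    simp only [List.reverse_reverse] at this
    simp only [pvAdd, pvStripEnd, this, pvAddLoop_val]
    ring
  · intro d hd
    simp only [pvAdd, pvStripEnd, List.mem_reverse] at hd
    have := pvStripR_mem _ _ hd
    exact pvAddLoop_ok as bs 0 has hbs (by omega) d (List.mem_reverse.mp this)
  · exact pvStripR_canon _ (by simp [pvAddLoop_ne_nil])

theorem pvVal_ne_zero (l : List Int) (hok : pvOK l) (hne : l ≠ []) (hl : l.getLast? ≠ some 0) :
    pvVal l ≠ 0 := by
  induction l with
  | nil => exact absurd rfl hne
  | cons d ds ih =>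
    cases ds with
    | nil =>
        simp only [List.getLast?_singleton, ne_eq, Option.some.injEq] at hl
        simp [pvVal, hl]
    | cons e es =>
        have hd := hok d (by simp)
        have h1 : pvVal (e :: es) ≠ 0 := by
          refine ih (fun x hx => hok x (by simp [hx])) (by simp) ?_
          rwa [List.getLast?_cons_cons] at hl
        simp only [pvVal] at *
        omega

theorem pvLoop_eq (l : List Int) (hok : pvOK l) (hne : l ≠ []) (hl : l.getLast? ≠ some 0) :
    ∀ acc, pvLoop (pvVal l) acc = l.reverse.map pvChr ++ acc := by
  induction l with
  | nil => exact absurd rfl hne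
  | cons d ds ih =>
    intro acc
    have hd := hok d (by simp)
    have hnz : pvVal (d :: ds) ≠ 0 := pvVal_ne_zero _ hok hne hl
    have hv : pvVal (d :: ds) = d + 5 * pvVal ds := rfl
    rw [pvLoop, dif_neg hnz]
    rw [PySem.Int.mod_eq_emod_of_pos (by norm_num : (0:Int) < 5),
        PySem.Int.floordiv_eq_ediv_of_pos (by norm_num : (0:Int) < 5)]
    have hmod : pvVal (d :: ds) % 5 = if 0 ≤ d then d else d + 5 := by
      split_ifs <;> omega
    have htail : ∀ acc', pvLoop (pvVal ds) acc' = ds.reverse.map pvChr ++ acc' := by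
      intro acc'
      by_cases hds : ds = []
      · subst hds; simp [pvVal, pvLoop]
      · obtain ⟨e, es, rfl⟩ := List.exists_cons_of_ne_nil hds
        refine ih (fun x hx => hok x (by simp [hx])) (by simp) ?_ acc'
        rwa [List.getLast?_cons_cons] at hl
    by_cases hdpos : 0 ≤ d
    · have hm : pvVal (d :: ds) % 5 = d := by rw [hmod]; simp [hdpos]
      have hgt : ¬ pvVal (d :: ds) % 5 > 2 := by omega
      rw [dif_neg hgt, hm]
      have hdiv : pvVal (d :: ds) / 5 = pvVal ds := by omega
      rw [hdiv, htail]
      simp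
    · have hm : pvVal (d :: ds) % 5 = d + 5 := by rw [hmod]; simp [hdpos]
      have hgt : pvVal (d :: ds) % 5 > 2 := by omega
      rw [dif_pos hgt]
      rw [hm]
      have hdiv : pvVal (d :: ds) / 5 + 1 = pvVal ds := by omega
      have harg : d + 5 - 5 = d := by ring
      rw [harg, hdiv, htail]
      simp

theorem pvCanon_out (l : List Int) (hok : pvOK l) (hc : pvCanon l) :
    (if pvVal l = 0 then "0" else String.ofList (pvLoop (pvVal l) [])) = pvToStr l := by
  rcases hc with h | ⟨hne, hl⟩
  · subst h; decide
  · rw [if_neg (pvVal_ne_zero l hok hne hl), pvLoop_eq l hok hne hl []]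
    simp [pvToStr]

-- sum of the parsed lines (B's total)
theorem pvTotal_foldl (l : List String) (a : Int) :
    l.foldl (fun t s => t + pvToInt s) a = a + (l.map pvToInt).sum := by
  induction l generalizing a with
  | nil => simp
  | cons s t ih => simp [ih]; ring

-- parse produces digits in range when all characters are valid
theorem pvParse_ok (s : String) (h : ∀ c ∈ s.toList, c ∈ ['=', '-', '0', '1', '2']) :
    pvOK (pvParse s) := by
  intro d hd
  simp only [pvParse, List.mem_map, List.mem_reverse] at hd
  obtain ⟨c, hc, rfl⟩ := hd
  have hm := h c hc
  simp only [List.mem_cons, List.not_mem_nil, or_false] at hm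
  rcases hm with rfl | rfl | rfl | rfl | rfl <;> decide

theorem pvFold_inv (t : List String)
    (ht : ∀ s ∈ t, ∀ c ∈ s.toList, c ∈ ['=', '-', '0', '1', '2']) :
    ∀ acc : List Int, pvOK acc →
      pvOK (t.foldl (fun acc s => pvAdd acc (pvParse s)) acc) ∧
      pvVal (t.foldl (fun acc s => pvAdd acc (pvParse s)) acc) = pvVal acc + (t.map pvToInt).sum ∧
      (t ≠ [] → pvCanon (t.foldl (fun acc s => pvAdd acc (pvParse s)) acc)) := by
  induction t with
  | nil => intro acc h; simp [h]
  | cons s t ih =>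
    intro acc hacc
    have hs := pvParse_ok s (ht s (by simp))
    have hadd := pvAdd_spec acc (pvParse s) hacc hs
    have ih' := ih (fun x hx => ht x (by simp [hx])) (pvAdd acc (pvParse s)) hadd.2.1
    refine ⟨by simpa using ih'.1, ?_, ?_⟩
    · simp only [List.foldl_cons, List.map_cons, List.sum_cons]
      rw [ih'.2.1, hadd.1, pvToInt_eq]
      ring
    · intro _
      cases ht' : t with
      | nil => simpa [ht'] using hadd.2.2
      | cons a b =>
          have := ih'.2.2 (by simp [ht'])
          simpa [ht'] using this

-- bridge from Pre_'s boolean character check to the propositional form the lemmas use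
theorem pvPre_chars (l : List String)
    (h : ∀ s ∈ l, (s.toList.all (fun c => c ∈ ['=', '-', '0', '1', '2'])) = true) :
    ∀ s ∈ l, ∀ c ∈ s.toList, c ∈ ['=', '-', '0', '1', '2'] := by
  intro s hs c hc
  have := h s hs
  simp only [List.all_eq_true] at this
  simpa using this c hc

-- round trip on the five valid characters
theorem pvChr_dig (c : Char) (h : c ∈ ['=', '-', '0', '1', '2']) : pvChr (pvDig c) = c := by
  simp only [List.mem_cons, List.not_mem_nil, or_false] at h
  rcases h with rfl | rfl | rfl | rfl | rfl <;> decide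

-- on a valid string A's str(SNAFU(s)) is s itself
theorem pvToStr_parse (s : String) (h : ∀ c ∈ s.toList, c ∈ ['=', '-', '0', '1', '2']) :
    pvToStr (pvParse s) = String.ofList s.toList := by
  simp only [pvToStr, pvParse, List.map_reverse, List.reverse_reverse, List.map_map]
  congr 1
  calc s.toList.map (pvChr ∘ pvDig) = s.toList.map id :=
        List.map_congr_left (fun c hc => pvChr_dig c (h c hc))
    _ = s.toList := List.map_id s.toList

-- the first character B's while loop produces is never '0'
theorem pvLoop_head (n : Int) (acc : List Char) :
    n = 0 ∨ (pvLoop n acc).head? ≠ some '0' := by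
  fun_induction pvLoop n acc with
  | case1 res => exact Or.inl rfl
  | case2 n res h0 hr ih =>
      refine Or.inr ?_
      rcases ih with hz | ih
      · rw [hz, pvLoop, dif_pos rfl]
        rw [PySem.Int.mod_eq_emod_of_pos (by norm_num : (0:Int) < 5)] at hr ⊢
        have h5 : n % 5 = 3 ∨ n % 5 = 4 := by omega
        rcases h5 with h5 | h5 <;> simp [h5] <;> decide
      · exact ih
  | case3 n res h0 hr ih =>
      refine Or.inr ?_
      rcases ih with hz | ih
      · rw [hz, pvLoop, dif_pos rfl]
        rw [PySem.Int.mod_eq_emod_of_pos (by norm_num : (0:Int) < 5)] at hr ⊢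
        have hz' := hz
        rw [PySem.Int.floordiv_eq_ediv_of_pos (by norm_num : (0:Int) < 5)] at hz'
        have h5 : n % 5 = 1 ∨ n % 5 = 2 := by omega
        rcases h5 with h5 | h5 <;> simp [h5] <;> decide
      · exact ih

-- A echoes the parsed string: getLast? of the parsed digits is the first character's digit
theorem pvParse_getLast (c : Char) (cs : List Char) (s : String) (hs : s.toList = c :: cs) :
    (pvParse s).getLast? = some (pvDig c) := by
  simp [pvParse, hs, List.getLast?_reverse]

-- ===== VERDICT (by name: the statement is the Claim_ definition above) =====
theorem solve_spec : Claim_unchanged_solve := by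
  intro puzzle_input hdom hpre hnd
  obtain ⟨hne, hval0⟩ := hpre
  have hval := pvPre_chars puzzle_input hval0
  cases puzzle_input with
  | nil => exact absurd rfl hne
  | cons h t =>
    have hh := pvParse_ok h (hval h (by simp))
    have hfold := pvFold_inv t (fun x hx => hval x (by simp [hx])) (pvParse h) hh
    set L := t.foldl (fun acc s => pvAdd acc (pvParse s)) (pvParse h) with hL
    have htot : (h :: t).foldl (fun t s => t + pvToInt s) 0 = pvVal L := by
      simp only [List.foldl_cons]
      rw [pvTotal_foldl, hfold.2.1, pvToInt_eq]
      ring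
    have hcanon : pvCanon L := by
      cases htcase : t with
      | cons a b => exact hfold.2.2 (by simp [htcase])
      | nil =>
        -- single line: ¬ D_ means the line is nonempty with no leading zero (or a single char)
        simp only [htcase] at hL
        simp only [hL, List.foldl_nil]
        have hD : ¬ (h.toList = [] ∨ (2 ≤ h.toList.length ∧ h.toList.head? = some '0')) := by
          intro hcon
          refine hnd ⟨by simp [htcase], ?_⟩
          intro s hs
          rw [htcase] at hs
          simp only [List.mem_singleton] at hs
          subst hs
          exact hcon
        have hD1 : h.toList ≠ [] := fun hx => hD (Or.inl hx)
        have hD2 : ¬ (2 ≤ h.toList.length ∧ h.toList.head? = some '0') :=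
          fun hx => hD (Or.inr hx)
        cases hlist : h.toList with
        | nil => exact absurd hlist hD1
        | cons c cs =>
          cases hcs : cs with
          | nil =>
              -- single character: singleton digit list, always canonical
              subst hcs
              by_cases hz : pvDig c = 0
              · exact Or.inl (by simp [pvParse, hlist, hz])
              · exact Or.inr ⟨by simp [pvParse, hlist], by simp [pvParse, hlist, hz]⟩
          | cons e es =>
            -- length ≥ 2 and first char ≠ '0'
            have hc0 : c ≠ '0' := by
              intro hc
              exact hD2 ⟨by simp [hlist, hcs], by simp [hlist, hc]⟩
            have hcmem : c ∈ ['=', '-', '0', '1', '2'] := hval h (by simp) c (by simp [hlist])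
            have hdignz : pvDig c ≠ 0 := by
              simp only [List.mem_cons, List.not_mem_nil, or_false] at hcmem
              rcases hcmem with rfl | rfl | rfl | rfl | rfl <;> first | decide | exact absurd rfl hc0
            refine Or.inr ⟨by simp [pvParse, hlist], ?_⟩
            rw [pvParse_getLast c cs h hlist]
            simpa using hdignz
    have hok : pvOK L := hfold.1
    show solve (h :: t) = solve_alt (h :: t)
    simp only [solve, solve_alt, htot]
    exact (pvCanon_out L hok hcanon).symm

set_option maxRecDepth 10000 in
theorem solve_changed : Claim_changed_solve := by
  unfold Claim_changed_solve
  refine ⟨by decide, by decide, by decide, by decide, ?_, by decide⟩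
  show solve_alt pvDiffWitness_solve = "1"
  simp [pvDiffWitness_solve, solve_alt, pvToInt, pvDig, pvChr, pvLoop,
    PySem.Int.mod, PySem.Int.floordiv, PySem.List.pyGet?, PySem.List.pyIdx?]

theorem solve_tight : Claim_exact_solve := by
  intro puzzle_input hdom hpre hD heq
  obtain ⟨hne, hval0⟩ := hpre
  obtain ⟨hlen, hprop⟩ := hD
  cases puzzle_input with
  | nil => exact hne rfl
  | cons s t =>
    cases t with
    | cons a b => simp at hlen
    | nil =>
      have hchars := pvPre_chars _ hval0 s (by simp)
      have hA : solve [s] = String.ofList s.toList := by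
        simp only [solve, List.foldl_nil]
        exact pvToStr_parse s hchars
      rcases hprop s (by simp) with hnilS | ⟨hlen2, hhead⟩
      · have hB : solve_alt [s] = "0" := by
          simp [solve_alt, pvToInt, hnilS]
        rw [hA, hB, hnilS] at heq
        exact absurd heq (by decide)
      · have htot : [s].foldl (fun t s => t + pvToInt s) 0 = pvToInt s := by simp
        by_cases hz : pvToInt s = 0
        · have hB : solve_alt [s] = "0" := by simp [solve_alt, htot, hz]
          rw [hA, hB] at heq
          have := congrArg String.toList heq
          simp at this
          rw [this] at hlen2
          simp at hlen2
        · have hB : solve_alt [s] = String.ofList (pvLoop (pvToInt s) []) := by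
            simp [solve_alt, htot, hz]
          rw [hA, hB] at heq
          have hl := congrArg String.toList heq
          simp at hl
          have := (pvLoop_head (pvToInt s) []).resolve_left hz
          rw [← hl, hhead] at this
          exact this rfl
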